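-- pv_equiv track=rewrite | github.com/ydb-platform/ydb | contrib/python/pyHanko/pyhanko/pdf_utils/font/opentype.py | _breakdown_cmap
-- ===== SOURCE A (Python) =====
-- def _breakdown_cmap(mappings):
--     # group contiguous mappings in a cmap
--
--     sorted_pairs = iter(sorted(mappings, key=lambda t: t[0]))
--
--     # use the first item of the iterator to initialise the state
--     source, target = next(sorted_pairs)
--     cur_segment_start = prev = source
--     cur_segment = [target]
--
--     for source, target in sorted_pairs:
--         # max segment length is 100
--         if not cur_segment or source == prev + 1:
--             # extend current segment
--             cur_segment.append(target)
--         else: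
--             # emit previous segment, and start a new one
--             yield cur_segment_start, cur_segment
--             cur_segment = [target]
--             cur_segment_start = source
--         prev = source
--
--     if cur_segment:
--         yield cur_segment_start, cur_segment
-- ===== SOURCE B (Python) =====
-- from itertools import groupby
--
-- def _breakdown_cmap(mappings):
--     # group contiguous mappings: after sorting by source, consecutive sources
--     # differing by 1 share a constant (source - index) key
--     pairs = sorted(mappings, key=lambda t: t[0])
--     for _, grp in groupby(enumerate(pairs), key=lambda p: p[1][0] - p[0]):
--         grp = list(grp)
--         yield grp[0][1][0], [t for _, (_, t) in grp]
-- ===== Notes on version B (the rewrite author's own statement) =====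
-- stated objective: idiomatic
-- what changed: The hand-rolled state machine (cur_segment_start/prev/cur_segment with explicit emit) is replaced by itertools.groupby over enumerate(sorted pairs) keyed on source-minus-index, which is constant exactly on contiguous runs; each group maps directly to (first source, targets).
-- crash fix: On empty mappings A raises RuntimeError (next() on an exhausted iterator inside a generator, PEP 479) when consumed; B naturally yields nothing, i.e. returns []. — e.g. on _breakdown_cmap([]): A raises RuntimeError, B returns []
import Mathlib
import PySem

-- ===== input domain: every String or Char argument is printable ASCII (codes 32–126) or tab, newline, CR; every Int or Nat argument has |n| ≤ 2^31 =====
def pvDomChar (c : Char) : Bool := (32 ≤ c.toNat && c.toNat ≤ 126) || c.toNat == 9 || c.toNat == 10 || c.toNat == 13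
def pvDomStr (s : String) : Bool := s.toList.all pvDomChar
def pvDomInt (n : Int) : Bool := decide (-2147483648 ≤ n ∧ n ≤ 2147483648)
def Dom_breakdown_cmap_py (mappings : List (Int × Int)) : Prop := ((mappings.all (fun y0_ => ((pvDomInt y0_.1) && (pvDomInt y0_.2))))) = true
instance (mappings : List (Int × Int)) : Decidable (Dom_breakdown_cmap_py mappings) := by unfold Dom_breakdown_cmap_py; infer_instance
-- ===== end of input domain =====

-- B groups the sorted pairs with a groupby on the key (source - index), constant exactly on
-- contiguous runs, instead of A's manual state machine; same cost, more idiomatic.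

-- ===== PORT A =====
-- loop body of A's for-loop: state is (cur_segment_start, prev, cur_segment, emitted)
def pvStep (s : Int × Int × List Int × List (Int × List Int)) (p : Int × Int) :
    Int × Int × List Int × List (Int × List Int) :=
  if s.2.2.1.isEmpty || p.1 == s.2.1 + 1 then
    (s.1, p.1, s.2.2.1 ++ [p.2], s.2.2.2)
  else
    (p.1, p.1, [p.2], s.2.2.2 ++ [(s.1, s.2.2.1)])

-- trailing 'if cur_segment: yield cur_segment_start, cur_segment'
def pvFin (s : Int × Int × List Int × List (Int × List Int)) : List (Int × List Int) :=
  if s.2.2.1.isEmpty then s.2.2.2 else s.2.2.2 ++ [(s.1, s.2.2.1)]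

def breakdown_cmap_py (mappings : List (Int × Int)) : List (Int × List Int) :=
  match PySem.List.sorted mappings (fun t => t.1) with
  | [] => []   -- next() raises here (RuntimeError on consumption); excluded by Pre_
  | (source, target) :: rest =>
      pvFin (rest.foldl pvStep (source, source, [target], []))

-- ===== PORT B =====
-- groupby key: source minus enumeration index
def pvKey (p : Int × (Int × Int)) : Int := p.2.1 - p.1

-- itertools.groupby, ported by hand: compare each element's key with the previous
-- element's key, keep the current run reversed
def pvGroupAux (last : Int × (Int × Int)) (curRev : List (Int × (Int × Int))) :
    List (Int × (Int × Int)) → List (List (Int × (Int × Int)))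
  | [] => [curRev.reverse]
  | y :: ys =>
      if pvKey y == pvKey last then pvGroupAux y (y :: curRev) ys
      else curRev.reverse :: pvGroupAux y [y] ys

def pvGroupBy : List (Int × (Int × Int)) → List (List (Int × (Int × Int)))
  | [] => []
  | x :: xs => pvGroupAux x [x] xs

-- one yielded item: grp[0][1][0] and the list of targets
def pvEmit (grp : List (Int × (Int × Int))) : Int × List Int :=
  ((grp.headD (0, (0, 0))).2.1, grp.map (fun p => p.2.2))

def breakdown_cmap_py_alt (mappings : List (Int × Int)) : List (Int × List Int) :=
  (pvGroupBy (PySem.List.enumerate (PySem.List.sorted mappings (fun t => t.1)))).map pvEmit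

-- ===== PRECONDITION & SPEC =====
-- Pre_ excludes only the empty list, on which A's generator raises RuntimeError when consumed
def Pre_breakdown_cmap_py (mappings : List (Int × Int)) : Prop := mappings ≠ []
instance (mappings : List (Int × Int)) : Decidable (Pre_breakdown_cmap_py mappings) := by
  unfold Pre_breakdown_cmap_py; infer_instance

def pvWitness_breakdown_cmap_py : (List (Int × Int)) := [(0, 0)]

-- On empty mappings A raises RuntimeError (next() on an exhausted iterator inside a
-- generator, PEP 479) when consumed; B naturally yields nothing, i.e. returns [].
def Raises_breakdown_cmap_py (mappings : List (Int × Int)) : Prop := mappings = []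
instance (mappings : List (Int × Int)) : Decidable (Raises_breakdown_cmap_py mappings) := by
  unfold Raises_breakdown_cmap_py; infer_instance
def pvRaiseWitness_breakdown_cmap_py : (List (Int × Int)) := []
def pvRaiseWitnessOut_breakdown_cmap_py : List (Int × List Int) := []

def Spec_breakdown_cmap_py (mappings : List (Int × Int)) (out : List (Int × List Int)) : Prop :=
  out = breakdown_cmap_py_alt mappings
instance (mappings : List (Int × Int)) (out : List (Int × List Int)) :
    Decidable (Spec_breakdown_cmap_py mappings out) := by
  unfold Spec_breakdown_cmap_py; infer_instance

-- ===== CLAIM (what is proved, stated in full; the proofs are below) =====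
def Claim_equal_breakdown_cmap_py : Prop :=
  ∀ (mappings : List (Int × Int)), Dom_breakdown_cmap_py mappings →
    Pre_breakdown_cmap_py mappings →
    Spec_breakdown_cmap_py mappings (breakdown_cmap_py mappings)

def Claim_raises_breakdown_cmap_py : Prop :=
  (∀ (mappings : List (Int × Int)), Dom_breakdown_cmap_py mappings →
      Raises_breakdown_cmap_py mappings → ¬ Pre_breakdown_cmap_py mappings) ∧
  (Dom_breakdown_cmap_py (pvRaiseWitness_breakdown_cmap_py) ∧
   Raises_breakdown_cmap_py (pvRaiseWitness_breakdown_cmap_py) ∧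
   breakdown_cmap_py_alt (pvRaiseWitness_breakdown_cmap_py) = pvRaiseWitnessOut_breakdown_cmap_py)

-- ===== LEMMAS AND PROOFS =====

-- reference segmentation of the (already sorted) tail, given a nonempty open segment
def pvRef (css prev : Int) (ts : List Int) : List (Int × Int) → List (Int × List Int)
  | [] => [(css, ts)]
  | (x, y) :: tl =>
      if x = prev + 1 then pvRef css x (ts ++ [y]) tl
      else (css, ts) :: pvRef x x [y] tl

theorem pvA_ref (l : List (Int × Int)) :
    ∀ (css prev : Int) (ts : List Int) (acc : List (Int × List Int)), ts ≠ [] →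
      pvFin (l.foldl pvStep (css, prev, ts, acc)) = acc ++ pvRef css prev ts l := by
  induction l with
  | nil =>
      intro css prev ts acc hts
      simp [pvFin, pvRef, List.isEmpty_iff, hts]
  | cons p tl ih =>
      intro css prev ts acc hts
      obtain ⟨x, y⟩ := p
      by_cases hx : x = prev + 1
      · subst hx
        simp only [List.foldl_cons, pvStep]
        rw [if_pos (by simp)]
        rw [ih css (prev + 1) (ts ++ [y]) acc (by simp)]
        simp [pvRef]
      · simp only [List.foldl_cons, pvStep]
        have hb : (x == prev + 1) = false := by simp [hx]
        rw [if_neg (by simp [hts, hx])]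
        rw [ih x x [y] (acc ++ [(css, ts)]) (by simp)]
        simp [pvRef, hx]

theorem pvB_ref (l : List (Int × Int)) :
    ∀ (i prev pt j0 css t0 : Int) (curTail : List (Int × (Int × Int))),
      (pvGroupAux (i, (prev, pt)) (((j0, (css, t0)) :: curTail).reverse)
          (PySem.List.enumerate l (i + 1))).map pvEmit
        = pvRef css prev (((j0, (css, t0)) :: curTail).map (fun p => p.2.2)) l := by
  induction l with
  | nil =>
      intro i prev pt j0 css t0 curTail
      simp [PySem.List.enumerate_nil, pvGroupAux, pvRef, pvEmit]
  | cons p tl ih =>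
      intro i prev pt j0 css t0 curTail
      obtain ⟨x, y⟩ := p
      rw [PySem.List.enumerate_cons]
      by_cases hx : x = prev + 1
      · have hk : (pvKey (i + 1, (x, y)) == pvKey (i, (prev, pt))) = true := by
          have h : pvKey (i + 1, (x, y)) = pvKey (i, (prev, pt)) := by
            simp only [pvKey]; omega
          simp [h]
        simp only [pvGroupAux, hk, if_true]
        have : ((i + 1, (x, y)) : Int × (Int × Int)) :: ((j0, (css, t0)) :: curTail).reverse
            = ((j0, (css, t0)) :: (curTail ++ [(i + 1, (x, y))])).reverse := by
          simp
        rw [this, ih (i + 1) x y j0 css t0 (curTail ++ [(i + 1, (x, y))])]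
        simp [pvRef, hx]
      · have hk : (pvKey (i + 1, (x, y)) == pvKey (i, (prev, pt))) = false := by
          simp only [pvKey, beq_eq_false_iff_ne, ne_eq]
          omega
        simp only [pvGroupAux, hk, Bool.false_eq_true, if_false]
        have h2 : [((i + 1, (x, y)) : Int × (Int × Int))]
            = (((i + 1, (x, y)) : Int × (Int × Int)) :: ([] : List (Int × (Int × Int)))).reverse := by simp
        rw [List.map_cons, h2, ih (i + 1) x y (i + 1) x y []]
        simp [pvRef, hx, pvEmit]

-- ===== VERDICT (by name: the statement is the Claim_ definition above) =====
theorem breakdown_cmap_py_spec : Claim_equal_breakdown_cmap_py := by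
  intro mappings _ hpre
  unfold Spec_breakdown_cmap_py breakdown_cmap_py breakdown_cmap_py_alt
  have hs : PySem.List.sorted mappings (fun t => t.1) ≠ [] := by
    simp only [ne_eq, PySem.List.sorted_eq_nil_iff]
    exact hpre
  obtain ⟨⟨a, b⟩, rest, hrest⟩ : ∃ hd tl, PySem.List.sorted mappings (fun t => t.1) = hd :: tl := by
    cases h : PySem.List.sorted mappings (fun t => t.1) with
    | nil => exact absurd h hs
    | cons hd tl => exact ⟨hd, tl, rfl⟩
  rw [hrest]
  have hA : (match (a, b) :: rest with
      | [] => ([] : List (Int × List Int))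
      | (source, target) :: rest => pvFin (rest.foldl pvStep (source, source, [target], [])))
      = pvFin (rest.foldl pvStep (a, a, [b], [])) := rfl
  rw [hA, pvA_ref rest a a [b] [] (by simp)]
  rw [PySem.List.enumerate_cons]
  show pvRef a a [b] rest
      = (pvGroupBy ((0, (a, b)) :: PySem.List.enumerate rest (0 + 1))).map pvEmit
  have h1 : [((0, (a, b)) : Int × (Int × Int))]
      = (((0, (a, b)) : Int × (Int × Int)) :: ([] : List (Int × (Int × Int)))).reverse := by simp
  rw [pvGroupBy, h1, pvB_ref rest 0 a b 0 a b []]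
  simp

@[simp] theorem breakdown_cmap_py_raises : Claim_raises_breakdown_cmap_py := by
  unfold Claim_raises_breakdown_cmap_py
  constructor
  · intro mappings _ hr
    unfold Pre_breakdown_cmap_py
    simp [Raises_breakdown_cmap_py] at hr
    simp [hr]
  · exact ⟨by decide, by decide, by decide⟩
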